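-- pv_equiv track=rewrite | github.com/Harahan/BUAA-discrete-mathematics-2-2022 | basic_problem.py | augment_path
-- ===== SOURCE A (Python) =====
-- def augment_path(Vu, Eu, path):
-- 	v0 = path[0]
-- 	un = path[-1]
-- 	u0 = -1
-- 	vn = -1
-- 	for (u, v) in Eu:
-- 		if v == v0 and u in Vu:
-- 			u0 = u
-- 		if u == v0 and v in Vu:
-- 			u0 = v
-- 	for (u, v) in Eu:
-- 		if v == un and u in Vu:
-- 			vn = u
-- 		if u == un and v in Vu:
-- 			vn = v
-- 	if u0 != -1 and vn != -1:
-- 		path = [u0] + path + [vn]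
-- 	return path
-- ===== SOURCE B (Python) =====
-- def augment_path(Vu, Eu, path):
--     v0 = path[0]
--     un = path[-1]
--     Vs = set(Vu)
--     last = {}
--     for (u, v) in Eu:
--         if u in Vs:
--             last[v] = u
--         if v in Vs:
--             last[u] = v
--     u0 = last.get(v0, -1)
--     vn = last.get(un, -1)
--     if u0 != -1 and vn != -1:
--         path = [u0] + path + [vn]
--     return path
-- ===== Notes on version B (the rewrite author's own statement) =====
-- stated objective: alternative
-- what changed: Replaces A's two separate scans of Eu (one per path endpoint) by a single pass that builds a target-to-last-neighbour dict, with the two endpoint answers read off by O(1) lookups.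
import Mathlib
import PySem

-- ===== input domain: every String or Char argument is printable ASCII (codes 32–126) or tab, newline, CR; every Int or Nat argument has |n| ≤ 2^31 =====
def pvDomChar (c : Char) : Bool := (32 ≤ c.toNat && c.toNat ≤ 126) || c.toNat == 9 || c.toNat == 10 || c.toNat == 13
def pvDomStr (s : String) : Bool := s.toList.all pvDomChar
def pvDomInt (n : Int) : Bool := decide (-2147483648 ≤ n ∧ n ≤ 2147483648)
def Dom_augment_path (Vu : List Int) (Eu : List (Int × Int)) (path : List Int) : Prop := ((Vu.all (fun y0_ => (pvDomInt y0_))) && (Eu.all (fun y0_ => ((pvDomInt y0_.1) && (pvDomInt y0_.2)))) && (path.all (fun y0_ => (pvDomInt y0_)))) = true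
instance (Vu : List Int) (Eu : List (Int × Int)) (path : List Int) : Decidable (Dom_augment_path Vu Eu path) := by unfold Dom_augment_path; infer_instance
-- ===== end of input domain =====

-- B builds one target→last-neighbour dict in a single pass over Eu and answers both endpoints by lookup,
-- instead of A's two separate scans of the edge list (objective: alternative; return value only, no mutation).

-- ===== PORT A =====
def augment_path (Vu : List Int) (Eu : List (Int × Int)) (path : List Int) : List Int :=
  let v0 := (PySem.List.pyGet? path 0).getD 0          -- path[0]; Pre_ excludes path = []
  let un := (PySem.List.pyGet? path (-1)).getD 0       -- path[-1]
  let u0 := Eu.foldl (fun u0 e =>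
      let u0 := if e.2 == v0 && Vu.contains e.1 then e.1 else u0
      if e.1 == v0 && Vu.contains e.2 then e.2 else u0) (-1)
  let vn := Eu.foldl (fun vn e =>
      let vn := if e.2 == un && Vu.contains e.1 then e.1 else vn
      if e.1 == un && Vu.contains e.2 then e.2 else vn) (-1)
  if u0 != -1 && vn != -1 then u0 :: path ++ [vn] else path

-- ===== PORT B =====
def augment_path_alt (Vu : List Int) (Eu : List (Int × Int)) (path : List Int) : List Int :=
  let v0 := (PySem.List.pyGet? path 0).getD 0
  let un := (PySem.List.pyGet? path (-1)).getD 0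
  let vs := PySem.Set.ofList Vu
  let last := Eu.foldl (fun (d : PySem.Dict Int Int) e =>
      let d := if vs.contains e.1 then d.insert e.2 e.1 else d
      if vs.contains e.2 then d.insert e.1 e.2 else d) PySem.Dict.empty
  let u0 := last.getD v0 (-1)
  let vn := last.getD un (-1)
  if u0 != -1 && vn != -1 then u0 :: path ++ [vn] else path

-- ===== PRECONDITION & SPEC =====
-- Pre_ excludes only the empty path, on which A raises IndexError at path[0].
def Pre_augment_path (Vu : List Int) (Eu : List (Int × Int)) (path : List Int) : Prop := path ≠ []
instance (Vu : List Int) (Eu : List (Int × Int)) (path : List Int) : Decidable (Pre_augment_path Vu Eu path) := by unfold Pre_augment_path; infer_instance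
def pvWitness_augment_path : List Int × (List (Int × Int)) × List Int := ([1, 4], [(1, 2), (3, 4)], [2, 3])

def Spec_augment_path (Vu : List Int) (Eu : List (Int × Int)) (path : List Int) (out : List Int) : Prop := out = augment_path_alt Vu Eu path
instance (Vu : List Int) (Eu : List (Int × Int)) (path : List Int) (out : List Int) : Decidable (Spec_augment_path Vu Eu path out) := by unfold Spec_augment_path; infer_instance

-- ===== CLAIM =====
def Claim_equal_augment_path : Prop := ∀ (Vu : List Int) (Eu : List (Int × Int)) (path : List Int), Dom_augment_path Vu Eu path → Pre_augment_path Vu Eu path → Spec_augment_path Vu Eu path (augment_path Vu Eu path)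

-- ===== LEMMAS AND PROOFS =====

-- Reading target t out of B's dict after the pass equals A's single-target scan.
theorem dict_pass_eq_scan (Vu : List Int) (t : Int) :
    ∀ (Eu : List (Int × Int)) (d : PySem.Dict Int Int),
      (Eu.foldl (fun (d : PySem.Dict Int Int) e =>
          let d := if (PySem.Set.ofList Vu).contains e.1 then d.insert e.2 e.1 else d
          if (PySem.Set.ofList Vu).contains e.2 then d.insert e.1 e.2 else d) d).getD t (-1)
      = Eu.foldl (fun a e =>
          let a := if e.2 == t && Vu.contains e.1 then e.1 else a
          if e.1 == t && Vu.contains e.2 then e.2 else a) (d.getD t (-1)) := by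
  intro Eu
  induction Eu with
  | nil => intro d; rfl
  | cons e rest ih =>
    intro d
    simp only [List.foldl_cons]
    rw [ih]
    congr 1
    have hset : ∀ x : Int, (PySem.Set.ofList Vu).contains x = Vu.contains x := by
      intro x
      simp [PySem.Set.mem_ofList]
    by_cases h1 : e.1 ∈ Vu <;> by_cases h2 : e.2 ∈ Vu <;>
      by_cases ht1 : e.1 = t <;> by_cases ht2 : e.2 = t <;>
      first
      | (simp_all [PySem.Dict.getD_insert, beq_iff_eq]; done)
      | (simp_all [PySem.Dict.getD_insert, beq_iff_eq]
         simp [Ne.symm ht1, Ne.symm ht2])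
      | (simp_all [PySem.Dict.getD_insert, beq_iff_eq]
         simp [Ne.symm ht1])
      | (simp_all [PySem.Dict.getD_insert, beq_iff_eq]
         simp [Ne.symm ht2])

theorem augment_path_spec' (Vu : List Int) (Eu : List (Int × Int)) (path : List Int) :
    augment_path Vu Eu path = augment_path_alt Vu Eu path := by
  unfold augment_path augment_path_alt
  simp only [dict_pass_eq_scan, PySem.Dict.getD_empty]

-- ===== VERDICT =====
theorem augment_path_spec : Claim_equal_augment_path := by
  intro Vu Eu path _ _
  exact augment_path_spec' Vu Eu path
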